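-- pv_equiv track=rewrite | github.com/vivianersommer/CI1238-Otimizacao-2 | main.py | criar_matriz_restricoes
-- ===== SOURCE A (Python) =====
-- def criar_matriz_restricoes(numero_itens, capacidade, itens):
--     values_eq = []  # matrix
--     values_un = []
--     temp = 0
--
--     # [ 1, 1 ,1, 0, 0 ,0 , 0,...]
--     # [ 0, 0, 0, 1 ,1 ,1, 0, ...]
--     for i in range(0, numero_itens):  # adicionar uma linha
--         line = []
--
--         for i in range(0, temp):
--             line.append(0)
--
--         for i in range(temp, temp + numero_itens):
--             line.append(1)
--
--         for i in range(temp + numero_itens, (numero_itens * numero_itens) + numero_itens):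
--             line.append(0)
--
--         values_eq.append(line)
--         temp += numero_itens
--
--     # [ peso1, peso2, peso3, 0, 0, 0 , 0, ...]
--     # [ 0, 0, 0, peso1, peso2, peso3, 0, 0, 0 , 0,...]
--     temp = 0
--     loc_peso = (numero_itens * numero_itens)
--     for i in range(0, numero_itens):  # adicionar uma linha
--         line = []
--
--         for i in range(0, temp):
--             line.append(0)
--
--         it = 0
--         for i in range(temp, temp + numero_itens):
--             line.append(itens[it])
--             it += 1
--
--         for i in range(temp + numero_itens, (numero_itens * numero_itens) + numero_itens):
--             if i == loc_peso:
--                 line.append( -1 * capacidade)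
--             else:
--                 line.append(0)
--         loc_peso += 1
--
--         values_un.append(line)
--         temp += numero_itens
--
--     return values_eq, values_un
-- ===== SOURCE B (Python) =====
-- def criar_matriz_restricoes(numero_itens, capacidade, itens):
--     # Incremental shift construction: each row is obtained from the previous one
--     # by prepending zeros and trimming, instead of being rebuilt segment by segment.
--     n = numero_itens
--     values_eq = []
--     values_un = []
--     if n > 0:
--         ones = [1] * n + [0] * (n * n)
--         w = [itens[j] for j in range(n)] + [0] * (n * n - n)
--         cap = [-capacidade] + [0] * (n - 1)
--         for _ in range(n):
--             values_eq.append(ones)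
--             values_un.append(w + cap)
--             ones = [0] * n + ones[:n * n]
--             w = [0] * n + w[:n * n - n]
--             cap = [0] + cap[:n - 1]
--     return values_eq, values_un
-- ===== Notes on version B (the rewrite author's own statement) =====
-- stated objective: alternative
-- what changed: A rebuilds every row from scratch with three consecutive append loops driven by running temp/loc_peso counters; B builds only the first row of each matrix explicitly and derives each subsequent row from the previous one by prepending a block of zeros and trimming the tail (an incremental shift recurrence), pairing a shift-by-n weights block with a shift-by-1 capacity block for the inequality rows.
import Mathlib
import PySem

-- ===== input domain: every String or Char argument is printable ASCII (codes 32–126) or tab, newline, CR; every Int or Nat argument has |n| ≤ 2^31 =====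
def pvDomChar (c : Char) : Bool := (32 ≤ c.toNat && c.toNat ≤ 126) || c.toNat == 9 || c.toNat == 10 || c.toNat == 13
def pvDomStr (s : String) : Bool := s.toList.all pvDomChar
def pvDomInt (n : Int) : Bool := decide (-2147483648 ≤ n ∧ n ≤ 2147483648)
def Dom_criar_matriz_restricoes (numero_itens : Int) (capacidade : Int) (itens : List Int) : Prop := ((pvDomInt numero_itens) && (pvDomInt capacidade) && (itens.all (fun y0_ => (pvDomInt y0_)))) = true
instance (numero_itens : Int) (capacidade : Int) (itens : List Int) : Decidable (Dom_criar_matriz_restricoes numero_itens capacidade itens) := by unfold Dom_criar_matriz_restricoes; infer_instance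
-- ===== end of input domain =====

-- B replaces A's segment-by-segment row rebuilding with an incremental shift: each next row is
-- the previous one with zeros prepended and the tail trimmed (alternative decomposition, same cost).

-- ===== PORT A =====
-- one row of values_eq: zeros up to temp, ones for numero_itens slots, zeros to the end
def pvRowEqA (n temp : Int) : List Int :=
  let line := (PySem.List.pyRange 0 temp 1).foldl (fun l _ => l ++ [(0 : Int)]) []
  let line := (PySem.List.pyRange temp (temp + n) 1).foldl (fun l _ => l ++ [(1 : Int)]) line
  (PySem.List.pyRange (temp + n) (n * n + n) 1).foldl (fun l _ => l ++ [(0 : Int)]) line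

-- one row of values_un: zeros, then itens[it] with a running counter it (itens[it] raises
-- IndexError in Python when it is out of range — excluded by Pre_; pyGetD is exact inside Pre_),
-- then zeros with -1*capacidade at column loc
def pvRowUnA (n cap temp loc : Int) (itens : List Int) : List Int :=
  let line := (PySem.List.pyRange 0 temp 1).foldl (fun l _ => l ++ [(0 : Int)]) []
  let p := (PySem.List.pyRange temp (temp + n) 1).foldl
    (fun (p : List Int × Int) _ => (p.1 ++ [PySem.List.pyGetD itens p.2 0], p.2 + 1)) (line, 0)
  (PySem.List.pyRange (temp + n) (n * n + n) 1).foldl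
    (fun l i => l ++ [if i = loc then -1 * cap else 0]) p.1

def criar_matriz_restricoes (numero_itens : Int) (capacidade : Int) (itens : List Int) : List (List Int) × List (List Int) :=
  let eqp := (PySem.List.pyRange 0 numero_itens 1).foldl
    (fun (s : List (List Int) × Int) _ => (s.1 ++ [pvRowEqA numero_itens s.2], s.2 + numero_itens))
    ([], 0)
  let unp := (PySem.List.pyRange 0 numero_itens 1).foldl
    (fun (s : List (List Int) × Int × Int) _ =>
      (s.1 ++ [pvRowUnA numero_itens capacidade s.2.1 s.2.2 itens], s.2.1 + numero_itens, s.2.2 + 1))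
    ([], 0, numero_itens * numero_itens)
  (eqp.1, unp.1)

-- ===== PORT B =====
-- [itens[j] for j in range(n)]: itens[j] raises IndexError when j ≥ len(itens) — excluded by Pre_
def pvWeightsB (n : Int) (itens : List Int) : List Int :=
  (PySem.List.pyRange 0 n 1).map (fun j => PySem.List.pyGetD itens j 0)

-- the loop 'for _ in range(n)': append current rows, then shift each state list
-- (slices xs[:m] have 0 ≤ m here since n > 0 under the guard, so they are List.take — exact)
def pvLoopB : Nat → Int → List Int → List Int → List Int → List (List Int) × List (List Int)
  | 0, _, _, _, _ => ([], [])
  | k+1, n, ones, w, capr =>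
      let rest := pvLoopB k n (List.replicate n.toNat 0 ++ ones.take (n * n).toNat)
                              (List.replicate n.toNat 0 ++ w.take (n * n - n).toNat)
                              ((0 : Int) :: capr.take (n - 1).toNat)
      (ones :: rest.1, (w ++ capr) :: rest.2)

def criar_matriz_restricoes_alt (numero_itens : Int) (capacidade : Int) (itens : List Int) : List (List Int) × List (List Int) :=
  if 0 < numero_itens then
    pvLoopB numero_itens.toNat numero_itens
      (List.replicate numero_itens.toNat 1 ++ List.replicate (numero_itens * numero_itens).toNat 0)
      (pvWeightsB numero_itens itens ++ List.replicate (numero_itens * numero_itens - numero_itens).toNat 0)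
      ((-capacidade) :: List.replicate (numero_itens - 1).toNat 0)
  else ([], [])

-- ===== PRECONDITION & SPEC =====
-- Pre_ excludes exactly the inputs where the Python A raises IndexError (numero_itens ≥ 1 with
-- fewer than numero_itens weights in itens); B raises IndexError on the same inputs.
def Pre_criar_matriz_restricoes (numero_itens : Int) (capacidade : Int) (itens : List Int) : Prop :=
  numero_itens ≤ 0 ∨ numero_itens ≤ (itens.length : Int)
instance (numero_itens : Int) (capacidade : Int) (itens : List Int) : Decidable (Pre_criar_matriz_restricoes numero_itens capacidade itens) := by unfold Pre_criar_matriz_restricoes; infer_instance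

def pvWitness_criar_matriz_restricoes : Int × Int × List Int := (2, 10, [3, 4])

def Spec_criar_matriz_restricoes (numero_itens : Int) (capacidade : Int) (itens : List Int) (out : List (List Int) × List (List Int)) : Prop := out = criar_matriz_restricoes_alt numero_itens capacidade itens
instance (numero_itens : Int) (capacidade : Int) (itens : List Int) (out : List (List Int) × List (List Int)) : Decidable (Spec_criar_matriz_restricoes numero_itens capacidade itens out) := by unfold Spec_criar_matriz_restricoes; infer_instance

-- ===== CLAIM (what is proved, stated in full; the proofs are below) =====
def Claim_equal_criar_matriz_restricoes : Prop := ∀ (numero_itens : Int) (capacidade : Int) (itens : List Int), Dom_criar_matriz_restricoes numero_itens capacidade itens → Pre_criar_matriz_restricoes numero_itens capacidade itens → Spec_criar_matriz_restricoes numero_itens capacidade itens (criar_matriz_restricoes numero_itens capacidade itens)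

-- ===== LEMMAS AND PROOFS =====

-- canonical forms of the rows / shift states, indexed by the row number i
def pvRowEq (N i : Nat) : List Int :=
  List.replicate (i * N) 0 ++ (List.replicate N 1 ++ List.replicate (N * N - i * N) 0)

def pvStateW (N : Nat) (wts : List Int) (i : Nat) : List Int :=
  List.replicate (i * N) 0 ++ (wts ++ List.replicate (N * N - N - i * N) 0)

def pvStateC (N : Nat) (cap : Int) (i : Nat) : List Int :=
  List.replicate i 0 ++ (-cap) :: List.replicate (N - 1 - i) 0

def pvRowUn (N : Nat) (wts : List Int) (cap : Int) (i : Nat) : List Int :=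
  pvStateW N wts i ++ pvStateC N cap i

-- A's middle values_un loop (append itens[it]; it += 1) as a map over the range
lemma pvMidUnA (itens : List Int) : ∀ (k : Nat) (a b c : Int) (init : List Int),
    (b - a).toNat = k →
    ((PySem.List.pyRange a b 1).foldl
      (fun (p : List Int × Int) _ => (p.1 ++ [PySem.List.pyGetD itens p.2 0], p.2 + 1)) (init, c)).1
    = init ++ (PySem.List.pyRange a b 1).map (fun x => PySem.List.pyGetD itens (x - a + c) 0) := by
  intro k
  induction k with
  | zero =>
    intro a b c init hk
    rw [PySem.List.pyRange_one_eq_nil (by omega)]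
    simp
  | succ k ih =>
    intro a b c init hk
    rw [PySem.List.pyRange_one_cons (by omega)]
    simp only [List.foldl_cons, List.map_cons]
    rw [ih (a + 1) b (c + 1) (init ++ [PySem.List.pyGetD itens c 0]) (by omega)]
    have : ∀ x : Int, x - (a + 1) + (c + 1) = x - a + c := by intro x; ring
    simp [this, List.append_assoc]

-- A's values_eq row equals the canonical row
lemma pvMapConstRange (a b : Int) (c : Int) :
    (PySem.List.pyRange a b 1).map (fun _ => c) = List.replicate (b - a).toNat c := by
  rw [List.map_const', PySem.List.length_pyRange_one]

lemma pvRowEqA_eq (N i : Nat) (hi : i < N) :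
    pvRowEqA (N : Int) ((i : Int) * N) = pvRowEq N i := by
  have hle : i * N ≤ N * N := Nat.mul_le_mul_right N (by omega)
  have c1 : ((i : Int) * N - 0).toNat = i * N := by
    rw [sub_zero, ← Nat.cast_mul, Int.toNat_natCast]
  have c2 : ((i : Int) * N + N - (i : Int) * N).toNat = N := by
    rw [add_sub_cancel_left, Int.toNat_natCast]
  have c3 : ((N : Int) * N + N - ((i : Int) * N + N)).toNat = N * N - i * N := by
    have : (N : Int) * N + N - ((i : Int) * N + N) = ((N * N : Nat) : Int) - ((i * N : Nat) : Int) := by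
      push_cast; ring
    rw [this, Int.toNat_sub]
  unfold pvRowEqA
  rw [PySem.List.foldl_append_singleton_eq_map, PySem.List.foldl_append_singleton_eq_map,
      PySem.List.foldl_append_singleton_eq_map, List.nil_append,
      pvMapConstRange, pvMapConstRange, pvMapConstRange, c1, c2, c3, pvRowEq, List.append_assoc]

-- A's values_un row equals the canonical row
lemma pvReindex (a b : Int) (f : Int → Int) :
    (PySem.List.pyRange a (a + b) 1).map (fun x => f (x - a)) = (PySem.List.pyRange 0 b 1).map f := by
  rw [PySem.List.pyRange_one, PySem.List.pyRange_one]
  simp [List.map_map, Function.comp]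

lemma pvRowUnA_eq (N i : Nat) (cap : Int) (itens : List Int) (hi : i < N) :
    pvRowUnA (N : Int) cap ((i : Int) * N) ((N : Int) * N + i) itens
      = pvRowUn N (pvWeightsB N itens) cap i := by
  have hle : i * N + N ≤ N * N := by nlinarith
  have c1 : ((i : Int) * N - 0).toNat = i * N := by
    rw [sub_zero, ← Nat.cast_mul, Int.toNat_natCast]
  have c2 : ((N : Int) * N + i - ((i : Int) * N + N)).toNat = (N * N - N - i * N) + i := by
    have h : (N : Int) * N + i - ((i : Int) * N + N) = ((N * N + i : Nat) : Int) - ((i * N + N : Nat) : Int) := by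
      push_cast; ring
    rw [h, Int.toNat_sub]; omega
  have c3 : ((N : Int) * N + N - ((N : Int) * N + i + 1)).toNat = N - 1 - i := by
    have h : (N : Int) * N + N - ((N : Int) * N + i + 1) = ((N * N + N : Nat) : Int) - ((N * N + i + 1 : Nat) : Int) := by
      push_cast; ring
    rw [h, Int.toNat_sub]; omega
  unfold pvRowUnA
  dsimp only
  have hline0 : (PySem.List.pyRange 0 ((i:Int)*N) 1).foldl (fun l _ => l ++ [(0:Int)]) []
      = List.replicate (i*N) (0:Int) := by
    rw [PySem.List.foldl_append_singleton_eq_map, List.nil_append, pvMapConstRange, c1]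
  rw [hline0, pvMidUnA itens ((((i:Int)*N + N) - (i:Int)*N).toNat) _ _ _ _ rfl]
  have hmid : (PySem.List.pyRange ((i:Int)*N) ((i:Int)*N + (N:Int)) 1).map
      (fun x => PySem.List.pyGetD itens (x - (i:Int)*N + 0) 0) = pvWeightsB N itens := by
    have := pvReindex ((i:Int)*N) (N:Int) (fun y => PySem.List.pyGetD itens y 0)
    simpa [pvWeightsB] using this
  rw [hmid]
  -- third segment
  have hsplit : PySem.List.pyRange ((i:Int)*N + N) ((N:Int)*N + N) 1
      = PySem.List.pyRange ((i:Int)*N + N) ((N:Int)*N + i) 1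
        ++ (PySem.List.pyRange ((N:Int)*N + i) ((N:Int)*N + i + 1) 1
        ++ PySem.List.pyRange ((N:Int)*N + i + 1) ((N:Int)*N + N) 1) := by
    rw [← PySem.List.pyRange_one_append ((N:Int)*N + i) ((N:Int)*N + i + 1) ((N:Int)*N + N)
          (by omega) (by exact_mod_cast (show N*N+i+1 ≤ N*N+N by omega))]
    exact PySem.List.pyRange_one_append _ _ _
      (by exact_mod_cast (show i*N+N ≤ N*N+i by omega)) (by exact_mod_cast (show N*N+i ≤ N*N+N by omega))
  rw [PySem.List.foldl_append_singleton_eq_map, hsplit]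
  rw [List.map_append, List.map_append]
  have hseg1 : (PySem.List.pyRange ((i:Int)*N + N) ((N:Int)*N + i) 1).map
      (fun x => if x = (N:Int)*N + i then -1 * cap else 0)
      = List.replicate ((N * N - N - i * N) + i) (0:Int) := by
    rw [List.map_congr_left (g := fun _ => (0:Int)) (fun x hx => by
      have hb := (PySem.List.mem_pyRange_one.1 hx).2
      rw [if_neg (by omega : ¬ (x = (N:Int)*N + i))]), pvMapConstRange, c2]
  have hseg2 : (PySem.List.pyRange ((N:Int)*N + i) ((N:Int)*N + i + 1) 1).map
      (fun x => if x = (N:Int)*N + i then -1 * cap else 0) = [-cap] := by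
    rw [PySem.List.pyRange_one_singleton]
    simp
  have hseg3 : (PySem.List.pyRange ((N:Int)*N + i + 1) ((N:Int)*N + N) 1).map
      (fun x => if x = (N:Int)*N + i then -1 * cap else 0)
      = List.replicate (N - 1 - i) (0:Int) := by
    rw [List.map_congr_left (g := fun _ => (0:Int)) (fun x hx => by
      have ha := (PySem.List.mem_pyRange_one.1 hx).1
      rw [if_neg (by omega : ¬ (x = (N:Int)*N + i))]), pvMapConstRange, c3]
  rw [hseg1, hseg2, hseg3, List.replicate_add]
  simp only [pvRowUn, pvStateW, pvStateC, List.append_assoc]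
  simp

-- A's outer values_eq loop
lemma pvRangeShift (f : Nat → List Int) (m i : Nat) :
    (List.range (m+1)).map (fun j => f (i + j))
    = f i :: (List.range m).map (fun j => f (i + 1 + j)) := by
  rw [List.range_succ_eq_map]
  simp only [List.map_cons, List.map_map, Nat.add_zero]
  congr 1
  refine List.map_congr_left (fun x _ => ?_)
  simp only [Function.comp_apply, Nat.succ_eq_add_one]
  congr 1
  omega

lemma pvOuterEqA (N : Nat) : ∀ (k i : Nat) (acc : List (List Int)), i + k = N →
    ((PySem.List.pyRange (i : Int) (N : Int) 1).foldl
      (fun (s : List (List Int) × Int) _ => (s.1 ++ [pvRowEqA (N : Int) s.2], s.2 + (N : Int)))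
      (acc, (i : Int) * N)).1
    = acc ++ (List.range k).map (fun j => pvRowEq N (i + j)) := by
  intro k
  induction k with
  | zero =>
    intro i acc hi
    rw [PySem.List.pyRange_one_eq_nil (by omega)]
    simp
  | succ k ih =>
    intro i acc hi
    rw [PySem.List.pyRange_one_cons (by exact_mod_cast (show i < N by omega))]
    simp only [List.foldl_cons]
    rw [pvRowEqA_eq N i (by omega)]
    have harith : (i : Int) * N + N = ((i+1 : Nat) : Int) * N := by push_cast; ring
    have hcast : (i : Int) + 1 = ((i+1 : Nat) : Int) := by push_cast; ring
    rw [harith, hcast, ih (i+1) _ (by omega), pvRangeShift]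
    simp [List.append_assoc]

-- A's outer values_un loop
lemma pvOuterUnA (N : Nat) (cap : Int) (itens : List Int) :
    ∀ (k i : Nat) (acc : List (List Int)), i + k = N →
    ((PySem.List.pyRange (i : Int) (N : Int) 1).foldl
      (fun (s : List (List Int) × Int × Int) _ =>
        (s.1 ++ [pvRowUnA (N : Int) cap s.2.1 s.2.2 itens], s.2.1 + (N : Int), s.2.2 + 1))
      (acc, (i : Int) * N, (N : Int) * N + i)).1
    = acc ++ (List.range k).map (fun j => pvRowUn N (pvWeightsB N itens) cap (i + j)) := by
  intro k
  induction k with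
  | zero =>
    intro i acc hi
    rw [PySem.List.pyRange_one_eq_nil (by omega)]
    simp
  | succ k ih =>
    intro i acc hi
    rw [PySem.List.pyRange_one_cons (by exact_mod_cast (show i < N by omega))]
    simp only [List.foldl_cons]
    rw [pvRowUnA_eq N i cap itens (by omega)]
    have h1 : (i : Int) * N + N = ((i+1 : Nat) : Int) * N := by push_cast; ring
    have h2 : (N : Int) * N + i + 1 = (N : Int) * N + ((i+1 : Nat) : Int) := by push_cast; ring
    have hcast : (i : Int) + 1 = ((i+1 : Nat) : Int) := by push_cast; ring
    rw [h1, h2, hcast, ih (i+1) _ (by omega), pvRangeShift]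
    simp [List.append_assoc]

-- shifting the canonical states gives the next canonical states
lemma pvShiftEq (N i : Nat) (h : i + 2 ≤ N) :
    List.replicate N (0 : Int) ++ (pvRowEq N i).take (N * N) = pvRowEq N (i + 1) := by
  have hiN : i * N + N ≤ N * N := by nlinarith
  have h2 : min (N*N) (i*N) = i*N := by omega
  have h3 : min (N*N - i*N) N = N := by omega
  have h5 : min (N*N - i*N - N) (N*N - i*N) = N*N - (i+1)*N := by
    have : (i+1)*N = i*N + N := by ring
    omega
  have h6 : (i+1)*N = N + i*N := by ring
  rw [pvRowEq, pvRowEq, List.take_append, List.take_append]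
  simp only [List.length_replicate]
  rw [List.take_replicate, h2, List.take_replicate, h3, List.take_replicate, h5, h6,
      List.replicate_add, List.append_assoc]

lemma pvShiftW (N i : Nat) (wts : List Int) (hw : wts.length = N) (h : i + 2 ≤ N) :
    List.replicate N (0 : Int) ++ (pvStateW N wts i).take (N * N - N) = pvStateW N wts (i + 1) := by
  have hiN : i * N + N + N ≤ N * N := by nlinarith
  have h2 : min (N*N - N) (i*N) = i*N := by omega
  have htw : wts.take (N*N - N - i*N) = wts := List.take_of_length_le (by omega)
  have h5 : min (N*N - N - i*N - wts.length) (N*N - N - i*N) = N*N - N - (i+1)*N := by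
    have : (i+1)*N = i*N + N := by ring
    omega
  have h6 : (i+1)*N = N + i*N := by ring
  rw [pvStateW, pvStateW, List.take_append, List.take_append]
  simp only [List.length_replicate]
  rw [List.take_replicate, h2, htw, List.take_replicate, h5, h6,
      List.replicate_add, List.append_assoc]

lemma pvShiftC (N i : Nat) (cap : Int) (h : i + 2 ≤ N) :
    (0 : Int) :: (pvStateC N cap i).take (N - 1) = pvStateC N cap (i + 1) := by
  have h1 : N - 1 - i = (N - 2 - i) + 1 := by omega
  have h2 : min (N-1) i = i := by omega
  have h4 : N - 1 - (i+1) = N - 2 - i := by omega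
  simp [pvStateC, List.take_append, List.take_replicate, h2, h1, h4,
    List.take_succ_cons, List.replicate_succ]
  rw [← List.replicate_succ, List.take_replicate]
  simp

-- B's loop, run from the canonical states of row i
lemma pvLoopB_spec (N : Nat) (cap : Int) (wts : List Int) (hw : wts.length = N) :
    ∀ (k i : Nat), i + k = N →
    pvLoopB k (N : Int) (pvRowEq N i) (pvStateW N wts i) (pvStateC N cap i)
    = ((List.range k).map (fun j => pvRowEq N (i + j)),
       (List.range k).map (fun j => pvRowUn N wts cap (i + j))) := by
  intro k
  induction k with
  | zero => intro i hi; simp [pvLoopB]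
  | succ k ih =>
    intro i hi
    have e1 : ((N:Int) * (N:Int)).toNat = N * N := by
      rw [← Nat.cast_mul, Int.toNat_natCast]
    have e2 : ((N:Int) * (N:Int) - (N:Int)).toNat = N * N - N := by
      rw [← Nat.cast_mul, Int.toNat_sub]
    have e3 : ((N:Int) - 1).toNat = N - 1 := by omega
    have e4 : (N:Int).toNat = N := Int.toNat_natCast N
    cases k with
    | zero =>
      simp [pvLoopB, pvRowUn]
    | succ m =>
      have h2 : i + 2 ≤ N := by omega
      have step : pvLoopB (m+1+1) (N:Int) (pvRowEq N i) (pvStateW N wts i) (pvStateC N cap i)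
          = ((pvRowEq N i) :: (pvLoopB (m+1) (N:Int)
                (List.replicate (N:Int).toNat 0 ++ (pvRowEq N i).take ((N:Int)*(N:Int)).toNat)
                (List.replicate (N:Int).toNat 0 ++ (pvStateW N wts i).take ((N:Int)*(N:Int)-(N:Int)).toNat)
                ((0:Int) :: (pvStateC N cap i).take ((N:Int)-1).toNat)).1,
             (pvStateW N wts i ++ pvStateC N cap i) :: (pvLoopB (m+1) (N:Int)
                (List.replicate (N:Int).toNat 0 ++ (pvRowEq N i).take ((N:Int)*(N:Int)).toNat)
                (List.replicate (N:Int).toNat 0 ++ (pvStateW N wts i).take ((N:Int)*(N:Int)-(N:Int)).toNat)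
                ((0:Int) :: (pvStateC N cap i).take ((N:Int)-1).toNat)).2) := rfl
      rw [step]
      simp only [e1, e2, e3, e4]
      rw [pvShiftEq N i h2, pvShiftW N i wts hw h2, pvShiftC N i cap h2,
          ih (i+1) (by omega)]
      have hr : ∀ f : Nat → List Int, (List.range (m+1+1)).map (fun j => f (i + j))
          = f i :: (List.range (m+1)).map (fun j => f (i + 1 + j)) := by
        intro f
        rw [List.range_succ_eq_map]
        simp only [List.map_cons, List.map_map, Nat.add_zero]
        congr 1
        refine List.map_congr_left (fun x _ => ?_)
        simp only [Function.comp_apply, Nat.succ_eq_add_one]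
        congr 1
        omega
      rw [hr, hr]
      simp [pvRowUn]

-- ===== VERDICT (by name: the statement is the Claim_ definition above) =====
theorem criar_matriz_restricoes_spec : Claim_equal_criar_matriz_restricoes := by
  intro n cap itens _hDom _hPre
  unfold Spec_criar_matriz_restricoes criar_matriz_restricoes criar_matriz_restricoes_alt
  by_cases hn : 0 < n
  · have hN : ((n.toNat : Nat) : Int) = n := Int.toNat_of_nonneg hn.le
    rw [← hN, if_pos (by rw [hN]; exact hn)]
    have e1 : ((n.toNat : Int) * (n.toNat : Int)).toNat = n.toNat * n.toNat := by
      rw [← Nat.cast_mul, Int.toNat_natCast]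
    have e2 : ((n.toNat : Int) * (n.toNat : Int) - (n.toNat : Int)).toNat = n.toNat * n.toNat - n.toNat := by
      rw [← Nat.cast_mul, Int.toNat_sub]
    have e3 : ((n.toNat : Int) - 1).toNat = n.toNat - 1 := by omega
    have e4 : (n.toNat : Int).toNat = n.toNat := Int.toNat_natCast n.toNat
    have hw : (pvWeightsB (n.toNat : Int) itens).length = n.toNat := by
      simp [pvWeightsB, PySem.List.length_pyRange_one]
      omega
    have hA1 := pvOuterEqA n.toNat n.toNat 0 [] (by omega)
    have hA2 := pvOuterUnA n.toNat cap itens n.toNat 0 [] (by omega)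
    have hB := pvLoopB_spec n.toNat cap (pvWeightsB (n.toNat : Int) itens) hw n.toNat 0 (by omega)
    simp only [Nat.cast_zero, zero_mul, add_zero] at hA1 hA2 hB
    rw [e1, e2, e3, e4]
    have hEq0 : pvRowEq n.toNat 0
        = List.replicate n.toNat (1:Int) ++ List.replicate (n.toNat * n.toNat) 0 := by
      simp [pvRowEq]
    have hW0 : pvStateW n.toNat (pvWeightsB (n.toNat : Int) itens) 0
        = pvWeightsB (n.toNat : Int) itens ++ List.replicate (n.toNat * n.toNat - n.toNat) 0 := by
      simp [pvStateW]
    have hC0 : pvStateC n.toNat cap 0 = (-cap) :: List.replicate (n.toNat - 1) 0 := by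
      simp [pvStateC]
    rw [← hEq0, ← hW0, ← hC0, hB]
    exact Prod.ext (by dsimp only; exact hA1) (by dsimp only; exact hA2)
  · rw [PySem.List.pyRange_one_eq_nil (by omega), if_neg hn]
    simp
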